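-- pv_equiv track=rewrite | github.com/GonzaloMBustos/software-engineering-2 | P1.py | exercise9
-- ===== SOURCE A (Python) =====
-- def exercise9(k: int, j: int) -> int:
--     r: int = 1
--     if k > 0 and k < 3: #C1
--         i: int = 0
--         while i < k: #C2
--             r = r * j
--             i = i +1
--     return r
-- ===== SOURCE B (Python) =====
-- def exercise9(k: int, j: int) -> int:
--     return j ** k if 0 < k < 3 else 1
-- ===== Notes on version B (the rewrite author's own statement) =====
-- stated objective: simpler
-- what changed: Replaces the accumulating while-loop with a closed-form power expression j**k inside the same 0<k<3 guard; no loop variable or iteration remains.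
import Mathlib
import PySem

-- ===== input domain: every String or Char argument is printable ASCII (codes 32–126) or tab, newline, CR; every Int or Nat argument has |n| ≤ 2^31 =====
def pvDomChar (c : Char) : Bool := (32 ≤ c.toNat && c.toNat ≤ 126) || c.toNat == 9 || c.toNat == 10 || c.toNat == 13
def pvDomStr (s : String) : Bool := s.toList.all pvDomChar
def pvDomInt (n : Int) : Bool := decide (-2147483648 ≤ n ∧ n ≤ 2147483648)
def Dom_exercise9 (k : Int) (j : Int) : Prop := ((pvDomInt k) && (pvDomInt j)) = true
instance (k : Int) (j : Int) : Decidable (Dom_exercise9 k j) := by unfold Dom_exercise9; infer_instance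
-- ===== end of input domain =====

-- B replaces A's accumulating while-loop (r = r*j, k times) with the closed-form power j**k inside the same 0<k<3 guard; objective: simpler.

-- ===== PORT A =====
-- the while loop 'while i < k: r = r * j; i = i + 1' starting at i = 0 runs (k.toNat) iterations (k > 0 here); fuel counts the remaining iterations
def exercise9Loop (j : Int) (r : Int) : Nat → Int
  | 0 => r
  | n + 1 => exercise9Loop j (r * j) n

def exercise9 (k : Int) (j : Int) : Int :=
  let r : Int := 1
  if 0 < k ∧ k < 3 then exercise9Loop j r k.toNat else r

-- ===== PORT B =====
def exercise9_alt (k : Int) (j : Int) : Int :=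
  if 0 < k ∧ k < 3 then j ^ k.toNat else 1

-- ===== PRECONDITION & SPEC =====
def Spec_exercise9 (k : Int) (j : Int) (out : Int) : Prop := out = exercise9_alt k j
instance (k : Int) (j : Int) (out : Int) : Decidable (Spec_exercise9 k j out) := by unfold Spec_exercise9; infer_instance

-- ===== CLAIM (what is proved, stated in full; the proofs are below) =====
def Claim_equal_exercise9 : Prop := ∀ (k : Int) (j : Int), Dom_exercise9 k j → Spec_exercise9 k j (exercise9 k j)

-- ===== LEMMAS AND PROOFS =====
theorem exercise9Loop_eq (j : Int) (r : Int) (n : Nat) : exercise9Loop j r n = r * j ^ n := by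
  induction n generalizing r with
  | zero => simp [exercise9Loop]
  | succ m ih => simp [exercise9Loop, ih]; ring

-- ===== VERDICT (by name: the statement is the Claim_ definition above) =====
theorem exercise9_spec : Claim_equal_exercise9 := by
  intro k j _
  unfold Spec_exercise9 exercise9 exercise9_alt
  split_ifs with h
  · simp [exercise9Loop_eq]
  · rfl
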